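-- pv_equiv track=rewrite | github.com/bcmin1018/CS336-Language-Modeling-from-Scratch-2025 | tests/utils/tokenization_util.py | replace_best_pair_worker
-- ===== SOURCE A (Python) =====
-- def replace_best_pair_worker(args):
--     tokens, best_pair, new_token = args
--     j = 0
--     new_tokens = []
--     while j < len(tokens):
--         if j < len(tokens) - 1 and (tokens[j], tokens[j+1]) == best_pair:
--             new_tokens.append(new_token)
--             j += 2
--         else:
--             new_tokens.append(tokens[j])
--             j += 1
--     return new_tokens
-- ===== SOURCE B (Python) =====
-- def replace_best_pair_worker(args):
--     tokens, best_pair, new_token = args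
--     n = len(tokens)
--     # pass 1: index every position where the pair occurs
--     matches = [i for i in range(n - 1) if (tokens[i], tokens[i + 1]) == best_pair]
--     # pass 2: greedy left-to-right selection of non-overlapping starts
--     accepted = set()
--     last = None
--     for i in matches:
--         if last is None or i >= last + 2:
--             accepted.add(i)
--             last = i
--     # pass 3: emit
--     out = []
--     for i in range(n):
--         if i in accepted:
--             out.append(new_token)
--         elif i - 1 in accepted:
--             pass
--         else:
--             out.append(tokens[i])
--     return out
-- ===== Notes on version B (the rewrite author's own statement) =====
-- stated objective: alternative
-- what changed: A merges in a single stateful while-loop that jumps the cursor by 1 or 2; B first builds an explicit index of all pair occurrences, then greedily selects non-overlapping start positions into a set, then emits the output in a plain left-to-right pass that consults that set.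
import Mathlib
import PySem

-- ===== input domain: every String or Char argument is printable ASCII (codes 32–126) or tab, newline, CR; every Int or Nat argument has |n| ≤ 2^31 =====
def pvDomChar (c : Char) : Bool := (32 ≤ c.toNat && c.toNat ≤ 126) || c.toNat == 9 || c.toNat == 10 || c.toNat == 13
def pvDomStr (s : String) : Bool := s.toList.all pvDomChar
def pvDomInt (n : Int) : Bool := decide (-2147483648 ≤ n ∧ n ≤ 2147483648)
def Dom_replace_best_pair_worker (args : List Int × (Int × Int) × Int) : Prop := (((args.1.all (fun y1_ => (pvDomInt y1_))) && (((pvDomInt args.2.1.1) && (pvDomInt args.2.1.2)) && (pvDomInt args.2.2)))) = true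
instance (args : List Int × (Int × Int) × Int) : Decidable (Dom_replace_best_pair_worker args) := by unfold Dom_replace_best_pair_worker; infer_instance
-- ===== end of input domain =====

-- B builds an explicit index of pair occurrences, greedily selects non-overlapping
-- starts, then emits in one plain pass; A merges in a single cursor-jumping loop.
-- Objective: alternative decomposition (same cost).

-- ===== PORT A =====
-- A's while-loop over the cursor j, jumping by 2 on a match, else by 1.
def pvAGo (tokens : List Int) (bp : Int × Int) (nt : Int) (j : Nat) : List Int :=
  if _h : j < tokens.length then
    if j + 1 < tokens.length ∧ (tokens.getD j 0, tokens.getD (j + 1) 0) = bp then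
      nt :: pvAGo tokens bp nt (j + 2)
    else
      tokens.getD j 0 :: pvAGo tokens bp nt (j + 1)
  else []
termination_by tokens.length - j

def replace_best_pair_worker (args : List Int × (Int × Int) × Int) : List Int :=
  pvAGo args.1 args.2.1 args.2.2 0

-- ===== PORT B =====
-- pass 1: all indices i with (tokens[i], tokens[i+1]) = bp
def pvBMatches (tokens : List Int) (bp : Int × Int) : List Nat :=
  (List.range (tokens.length - 1)).filter
    (fun i => (tokens.getD i 0 == bp.1) && (tokens.getD (i + 1) 0 == bp.2))

def pvLbOk : Option Nat → Nat → Bool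
  | none, _ => true
  | some b, i => decide (b + 2 ≤ i)

-- pass 2: greedy left-to-right selection of non-overlapping starts
def pvBSelect : List Nat → Option Nat → List Nat
  | [], _ => []
  | i :: rest, last =>
    if pvLbOk last i then i :: pvBSelect rest (some i) else pvBSelect rest last

-- pass 3: emit, consulting the accepted set
def pvBEmit (tokens : List Int) (acc : List Nat) (nt : Int) (j : Nat) : List Int :=
  if _h : j < tokens.length then
    (if j ∈ acc then [nt]
     else if 1 ≤ j ∧ (j - 1) ∈ acc then []
     else [tokens.getD j 0]) ++ pvBEmit tokens acc nt (j + 1)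
  else []
termination_by tokens.length - j

def replace_best_pair_worker_alt (args : List Int × (Int × Int) × Int) : List Int :=
  pvBEmit args.1 (pvBSelect (pvBMatches args.1 args.2.1) none) args.2.2 0

-- ===== PRECONDITION & SPEC =====
def Spec_replace_best_pair_worker (args : List Int × (Int × Int) × Int) (out : List Int) : Prop := out = replace_best_pair_worker_alt args
instance (args : List Int × (Int × Int) × Int) (out : List Int) : Decidable (Spec_replace_best_pair_worker args out) := by unfold Spec_replace_best_pair_worker; infer_instance

-- ===== CLAIM (what is proved, stated in full; the proofs are below) =====
def Claim_equal_replace_best_pair_worker : Prop := ∀ (args : List Int × (Int × Int) × Int), Dom_replace_best_pair_worker args → Spec_replace_best_pair_worker args (replace_best_pair_worker args)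

-- ===== LEMMAS AND PROOFS =====

-- membership in the match index
lemma mem_pvBMatches (tokens : List Int) (bp : Int × Int) (i : Nat) :
    i ∈ pvBMatches tokens bp ↔
      i + 1 < tokens.length ∧ (tokens.getD i 0, tokens.getD (i + 1) 0) = bp := by
  simp only [pvBMatches, List.mem_filter, List.mem_range, Bool.and_eq_true, beq_iff_eq,
    Prod.ext_iff]
  constructor
  · rintro ⟨h1, h2, h3⟩; exact ⟨by omega, h2, h3⟩
  · rintro ⟨h1, h2, h3⟩; exact ⟨by omega, h2, h3⟩

lemma pvBSelect_subset {l : List Nat} {lb : Option Nat} {x : Nat}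
    (h : x ∈ pvBSelect l lb) : x ∈ l := by
  induction l generalizing lb with
  | nil => simp [pvBSelect] at h
  | cons i rest ih =>
    simp only [pvBSelect] at h
    split at h
    · rcases List.mem_cons.mp h with h | h
      · simp [h]
      · exact List.mem_cons_of_mem _ (ih h)
    · exact List.mem_cons_of_mem _ (ih h)

-- the selected list has gaps of at least 2, and respects the lower bound
lemma pvBSelect_gap {l : List Nat} (hs : l.Pairwise (· < ·)) :
    ∀ lb : Option Nat,
      (pvBSelect l lb).Pairwise (fun a c => a + 2 ≤ c) ∧
        (∀ b, lb = some b → ∀ x ∈ pvBSelect l lb, b + 2 ≤ x) := by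
  induction l with
  | nil => intro lb; simp [pvBSelect]
  | cons i rest ih =>
    intro lb
    have hrest := List.Pairwise.of_cons hs
    have hhead := List.pairwise_cons.mp hs |>.1
    simp only [pvBSelect]
    split
    · rename_i hok
      obtain ⟨hp, hb⟩ := ih hrest (some i)
      refine ⟨List.pairwise_cons.mpr ⟨fun x hx => hb i rfl x hx, hp⟩, ?_⟩
      intro b hlb x hx
      subst hlb
      rcases List.mem_cons.mp hx with h | h
      · subst h; simpa [pvLbOk] using hok
      · have := hb i rfl x h
        have hix : i < x := by
          have := hhead x (pvBSelect_subset h); omega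
        have hbi : b + 2 ≤ i := by simpa [pvLbOk] using hok
        omega
    · rename_i hok
      obtain ⟨hp, hb⟩ := ih hrest lb
      refine ⟨hp, fun b hlb x hx => hb b hlb x hx⟩

lemma gap_no_succ {l : List Nat} (hp : l.Pairwise (fun a c => a + 2 ≤ c))
    {x : Nat} (hx : x ∈ l) : x + 1 ∉ l := by
  induction l with
  | nil => simp at hx
  | cons a rest ih =>
    obtain ⟨ha, hrest⟩ := List.pairwise_cons.mp hp
    intro hmem
    rcases List.mem_cons.mp hx with h | h
    · subst h
      rcases List.mem_cons.mp hmem with h' | h'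
      · omega
      · have := ha _ h'; omega
    · rcases List.mem_cons.mp hmem with h' | h'
      · have := ha _ h; omega
      · exact ih hrest h h'

-- completeness of the greedy selection: a match whose predecessor is not
-- selected is itself selected
lemma pvBSelect_complete {l : List Nat} (hs : l.Pairwise (· < ·)) :
    ∀ lb : Option Nat, ∀ j ∈ l, pvLbOk lb j = true →
      (j = 0 ∨ (j - 1) ∉ pvBSelect l lb) → j ∈ pvBSelect l lb := by
  induction l with
  | nil => intro lb j hj; simp at hj
  | cons i rest ih =>
    intro lb j hj hok hpred
    have hrest := List.Pairwise.of_cons hs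
    have hhead := List.pairwise_cons.mp hs |>.1
    simp only [pvBSelect] at hpred ⊢
    by_cases hacc : pvLbOk lb i = true
    · simp only [hacc, if_true] at hpred ⊢
      rcases List.mem_cons.mp hj with h | h
      · simp [h]
      · have hij : i < j := hhead j h
        by_cases hij2 : i + 2 ≤ j
        · refine List.mem_cons_of_mem _ (ih hrest (some i) j h (by simp [pvLbOk, hij2]) ?_)
          rcases hpred with h0 | hnp
          · omega
          · right; intro hmem; exact hnp (List.mem_cons_of_mem _ hmem)
        · -- j = i + 1, but then j - 1 = i is in the selection: contradiction
          have hji : j = i + 1 := by omega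
          rcases hpred with h0 | hnp
          · omega
          · exfalso; apply hnp; rw [hji]; simp
    · simp only [hacc] at hpred ⊢
      rcases List.mem_cons.mp hj with h | h
      · subst h; exact absurd hok hacc
      · exact ih hrest lb j h hok hpred

lemma pvBMatches_sorted (tokens : List Int) (bp : Int × Int) :
    (pvBMatches tokens bp).Pairwise (· < ·) :=
  List.Pairwise.filter _ List.pairwise_lt_range

-- main loop correspondence
lemma main_loop (tokens : List Int) (bp : Int × Int) (nt : Int) :
    ∀ k j, tokens.length - j ≤ k → (j = 0 ∨ (j - 1) ∉ pvBSelect (pvBMatches tokens bp) none) →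
      pvAGo tokens bp nt j = pvBEmit tokens (pvBSelect (pvBMatches tokens bp) none) nt j := by
  set acc := pvBSelect (pvBMatches tokens bp) none with hacc
  have hsorted := pvBMatches_sorted tokens bp
  have hgap : acc.Pairwise (fun a c => a + 2 ≤ c) := (pvBSelect_gap hsorted none).1
  intro k
  induction k with
  | zero =>
    intro j hk _
    have hj : ¬ j < tokens.length := by omega
    rw [pvAGo, pvBEmit]; simp [hj]
  | succ k ih =>
    intro j hk hpred
    by_cases hj : j < tokens.length
    · by_cases hmem : j ∈ acc
      · -- accepted start: A matches here and jumps by 2; B emits nt then skips j+1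
        have hm := pvBSelect_subset hmem
        obtain ⟨hlt, heq⟩ := (mem_pvBMatches tokens bp j).mp hm
        have hns : j + 1 ∉ acc := gap_no_succ hgap hmem
        have hrec : pvAGo tokens bp nt (j + 2) = pvBEmit tokens acc nt (j + 2) := by
          refine ih (j + 2) (by omega) (Or.inr ?_)
          simpa using hns
        rw [pvAGo, dif_pos hj, if_pos ⟨hlt, heq⟩]
        rw [pvBEmit, dif_pos hj, if_pos hmem]
        rw [pvBEmit, dif_pos hlt, if_neg hns,
          if_pos (show 1 ≤ j + 1 ∧ (j + 1 - 1) ∈ acc from ⟨by omega, by simpa using hmem⟩)]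
        simp [hrec]
      · -- not accepted: A cannot match here (greedy completeness), both emit tokens[j]
        have hnoC : ¬ (j + 1 < tokens.length ∧ (tokens.getD j 0, tokens.getD (j + 1) 0) = bp) := by
          intro hC
          have hm : j ∈ pvBMatches tokens bp := (mem_pvBMatches tokens bp j).mpr hC
          exact hmem (pvBSelect_complete hsorted none j hm (by simp [pvLbOk]) hpred)
        have hnskip : ¬ (1 ≤ j ∧ (j - 1) ∈ acc) := by
          intro h
          rcases hpred with h0 | hnp
          · omega
          · exact hnp h.2
        have hrec : pvAGo tokens bp nt (j + 1) = pvBEmit tokens acc nt (j + 1) := by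
          refine ih (j + 1) (by omega) (Or.inr ?_)
          simpa using hmem
        rw [pvAGo, dif_pos hj, if_neg hnoC]
        rw [pvBEmit, dif_pos hj, if_neg hmem, if_neg hnskip]
        simp [hrec]
    · rw [pvAGo, pvBEmit]; simp [hj]

-- ===== VERDICT (by name: the statement is the Claim_ definition above) =====
theorem replace_best_pair_worker_spec : Claim_equal_replace_best_pair_worker := by
  intro args _
  unfold Spec_replace_best_pair_worker replace_best_pair_worker replace_best_pair_worker_alt
  exact main_loop args.1 args.2.1 args.2.2 args.1.length 0 (by omega) (Or.inl rfl)
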